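-- pv_equiv track=rewrite | github.com/AndriusZimkus/AdventOfCode2024 | Day7/BridgeRepair.py | isResultPossible
-- ===== SOURCE A (Python) =====
-- def isResultPossible(row):
--         result = row[0]
--         elements = row[1]
--         if len(elements) == 1 and elements[0] == result:
--                 return True
--         elif len(elements) == 1:
--                 return False
--
--         firstElement = elements[0]
--         secondElement = elements[1]
--
--         add = firstElement+secondElement
--         multiply = firstElement*secondElement
--
--         newAddElements = elements[2:]
--         newAddElements.insert(0,add)
--         newMultiplyElements = elements[2:]
--         newMultiplyElements.insert(0,multiply)
--         return isResultPossible((result,newAddElements)) or isResultPossible((result,newMultiplyElements))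
-- ===== SOURCE B (Python) =====
-- def isResultPossible(row):
--     result, elements = row
--     vals = {elements[0]}
--     for e in elements[1:]:
--         vals = {v + e for v in vals} | {v * e for v in vals}
--     return result in vals
-- ===== Notes on version B (the rewrite author's own statement) =====
-- stated objective: alternative
-- what changed: Replaced A's binary recursion over the two ways to combine the first pair by a single left-to-right pass maintaining the set of distinct reachable partial values; much cheaper when many partial values coincide, same worst case.
import Mathlib
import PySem

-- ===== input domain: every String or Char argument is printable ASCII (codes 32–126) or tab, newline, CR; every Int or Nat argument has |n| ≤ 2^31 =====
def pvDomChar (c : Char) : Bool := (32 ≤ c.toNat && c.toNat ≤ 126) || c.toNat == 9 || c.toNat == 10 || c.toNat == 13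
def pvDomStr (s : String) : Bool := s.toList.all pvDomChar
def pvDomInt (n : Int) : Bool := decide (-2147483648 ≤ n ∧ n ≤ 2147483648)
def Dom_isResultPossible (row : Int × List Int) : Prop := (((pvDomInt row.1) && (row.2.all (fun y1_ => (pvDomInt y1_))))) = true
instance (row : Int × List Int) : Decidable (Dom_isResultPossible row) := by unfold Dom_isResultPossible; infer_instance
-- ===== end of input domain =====

-- B replaces A's binary recursion by one left-to-right pass maintaining the set of distinct reachable partial values (alternative algorithm).

-- ===== PORT A =====
def isResultPossible : Int × List Int → Bool
  | (_, []) => false          -- A raises IndexError here; excluded by Pre_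
  | (result, [a]) => a == result
  | (result, a :: b :: rest) =>
      isResultPossible (result, (a + b) :: rest) || isResultPossible (result, (a * b) :: rest)
termination_by row => row.2.length

-- ===== PORT B =====
def isResultPossible_alt (row : Int × List Int) : Bool :=
  match row with
  | (_, []) => false          -- B raises IndexError here; excluded by Pre_
  | (result, e0 :: rest) =>
      let vals := rest.foldl
        (fun (s : PySem.Set Int) e =>
          PySem.Set.union (PySem.Set.ofList (s.map (· + e))) (s.map (· * e)))
        (PySem.Set.ofList [e0])
      PySem.Set.contains vals result

-- ===== PRECONDITION & SPEC =====
-- Pre_ excludes exactly the empty element list, on which both Pythons raise IndexError.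
def Pre_isResultPossible (row : Int × List Int) : Prop := row.2 ≠ []
instance (row : Int × List Int) : Decidable (Pre_isResultPossible row) := by unfold Pre_isResultPossible; infer_instance
def pvWitness_isResultPossible : (Int × List Int) := (190, [19, 10])

def Spec_isResultPossible (row : Int × List Int) (out : Bool) : Prop := out = isResultPossible_alt row
instance (row : Int × List Int) (out : Bool) : Decidable (Spec_isResultPossible row out) := by unfold Spec_isResultPossible; infer_instance

-- ===== CLAIM (what is proved, stated in full; the proofs are below) =====
def Claim_equal_isResultPossible : Prop := ∀ (row : Int × List Int), Dom_isResultPossible row → Pre_isResultPossible row → Spec_isResultPossible row (isResultPossible row)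

-- ===== LEMMAS AND PROOFS =====

-- all values reachable by folding +/* of the elements of `rest` into the accumulator `v`
def reachAll (v : Int) : List Int → List Int
  | [] => [v]
  | e :: rest => reachAll (v + e) rest ++ reachAll (v * e) rest

theorem isResultPossible_eq_mem_reachAll (rest : List Int) (v r : Int) :
    isResultPossible (r, v :: rest) = true ↔ r ∈ reachAll v rest := by
  induction rest generalizing v with
  | nil => rw [isResultPossible]; simp [reachAll]; exact eq_comm
  | cons e rest ih =>
      rw [isResultPossible]
      simp [reachAll, Bool.or_eq_true, ih]

theorem mem_foldl_step (rest : List Int) (s : PySem.Set Int) (r : Int) :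
    r ∈ rest.foldl
        (fun (s : PySem.Set Int) e =>
          PySem.Set.union (PySem.Set.ofList (s.map (· + e))) (s.map (· * e))) s
      ↔ ∃ v ∈ s, r ∈ reachAll v rest := by
  induction rest generalizing s with
  | nil => simp [reachAll]
  | cons e rest ih =>
      rw [List.foldl_cons, ih]
      constructor
      · rintro ⟨v, hv, hr⟩
        rw [PySem.Set.mem_union] at hv
        rcases hv with hv | hv
        · rw [PySem.Set.mem_ofList] at hv
          obtain ⟨u, hu, rfl⟩ := List.mem_map.mp hv
          exact ⟨u, hu, by simp [reachAll, hr]⟩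
        · obtain ⟨u, hu, rfl⟩ := List.mem_map.mp hv
          exact ⟨u, hu, by simp [reachAll, hr]⟩
      · rintro ⟨u, hu, hr⟩
        simp only [reachAll, List.mem_append] at hr
        rcases hr with hr | hr
        · exact ⟨u + e, by rw [PySem.Set.mem_union, PySem.Set.mem_ofList]; exact Or.inl (List.mem_map.mpr ⟨u, hu, rfl⟩), hr⟩
        · exact ⟨u * e, by rw [PySem.Set.mem_union]; exact Or.inr (List.mem_map.mpr ⟨u, hu, rfl⟩), hr⟩

-- ===== VERDICT (by name: the statement is the Claim_ definition above) =====
theorem isResultPossible_spec : Claim_equal_isResultPossible := by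
  intro row _ hpre
  obtain ⟨r, els⟩ := row
  cases els with
  | nil => exact absurd rfl hpre
  | cons e0 rest =>
      unfold Spec_isResultPossible
      show isResultPossible (r, e0 :: rest) = isResultPossible_alt (r, e0 :: rest)
      rw [Bool.eq_iff_iff, isResultPossible_eq_mem_reachAll]
      simp only [isResultPossible_alt, PySem.Set.contains_iff, mem_foldl_step]
      constructor
      · intro h; exact ⟨e0, by rw [PySem.Set.mem_ofList]; simp, h⟩
      · rintro ⟨v, hv, h⟩
        rw [PySem.Set.mem_ofList] at hv
        simp only [List.mem_singleton] at hv
        subst hv; exact h
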